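-- pv_equiv track=rewrite | github.com/pl3lee/ConnectX | connectx.py | check_longest_consecutive
-- ===== SOURCE A (Python) =====
-- def check_longest_consecutive(list1):
--     longest_temp = 1
--     longest_final = 1
--     for i in range(len(list1)):
--         k = 1
--         while i + k < len(list1) and list1[i] == list1[i + k] and list1[i] != 0:
--             longest_temp += 1
--             k += 1
--         if longest_temp > longest_final:
--             longest_final = longest_temp
--         longest_temp = 1
--     return longest_final
-- ===== SOURCE B (Python) =====
-- def check_longest_consecutive(list1):
--     best = 1
--     cur = 1
--     for a, b in zip(list1, list1[1:]):
--         cur = cur + 1 if a == b and a != 0 else 1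
--         if cur > best:
--             best = cur
--     return best
-- ===== Notes on version B (the rewrite author's own statement) =====
-- stated objective: faster
-- what changed: Replaced the quadratic rescan (an inner while-loop measuring the run starting at every index) by a single linear pass over adjacent pairs that keeps the current run length and resets it on a change or a zero.
import Mathlib
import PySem

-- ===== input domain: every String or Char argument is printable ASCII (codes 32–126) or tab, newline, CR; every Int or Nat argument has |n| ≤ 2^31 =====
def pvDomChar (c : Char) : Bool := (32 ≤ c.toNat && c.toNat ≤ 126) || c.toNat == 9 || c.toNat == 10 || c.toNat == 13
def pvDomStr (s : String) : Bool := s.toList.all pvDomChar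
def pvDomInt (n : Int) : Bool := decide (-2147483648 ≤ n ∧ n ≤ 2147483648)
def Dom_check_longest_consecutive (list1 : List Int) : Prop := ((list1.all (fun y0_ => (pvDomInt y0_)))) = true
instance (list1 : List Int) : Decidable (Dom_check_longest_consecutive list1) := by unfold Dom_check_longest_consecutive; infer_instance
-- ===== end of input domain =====

-- B replaces A's quadratic inner rescan with one linear pass over adjacent pairs (objective: faster).

-- ===== PORT A =====
-- inner while-loop of A: `while i+k < len and list1[i] == list1[i+k] and list1[i] != 0`
def pvInnerA (l : List Int) (i k t : Int) : Int :=
  if h : i + k < l.length ∧ PySem.List.pyGet? l i = PySem.List.pyGet? l (i + k)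
         ∧ PySem.List.pyGet? l i ≠ some 0
  then pvInnerA l i (k + 1) (t + 1)
  else t
termination_by ((l.length : Int) - (i + k)).toNat
decreasing_by omega

def check_longest_consecutive (list1 : List Int) : Int :=
  -- state = (longest_temp, longest_final)
  (((PySem.List.pyRange 0 list1.length 1).foldl
      (fun (st : Int × Int) i =>
        let t := pvInnerA list1 i 1 st.1
        (1, if t > st.2 then t else st.2))
      (1, 1))).2

-- ===== PORT B =====
def check_longest_consecutive_alt (list1 : List Int) : Int :=
  -- state = (best, cur); pairs = zip(list1, list1[1:])
  ((list1.zip (PySem.List.slice list1 (some 1) none)).foldl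
      (fun (st : Int × Int) p =>
        let cur := if p.1 = p.2 ∧ p.1 ≠ 0 then st.2 + 1 else 1
        (if cur > st.1 then cur else st.1, cur))
      (1, 1)).1

-- ===== PRECONDITION & SPEC =====
def Spec_check_longest_consecutive (list1 : List Int) (out : Int) : Prop := out = check_longest_consecutive_alt list1
instance (list1 : List Int) (out : Int) : Decidable (Spec_check_longest_consecutive list1 out) := by unfold Spec_check_longest_consecutive; infer_instance

-- ===== CLAIM (what is proved, stated in full; the proofs are below) =====
def Claim_equal_check_longest_consecutive : Prop := ∀ (list1 : List Int), Dom_check_longest_consecutive list1 → Spec_check_longest_consecutive list1 (check_longest_consecutive list1)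

-- ===== LEMMAS AND PROOFS =====

-- length of the run of elements equal to v (and nonzero) at the front of l
def pvRun (v : Int) : List Int → Int
  | [] => 0
  | y :: t => if y = v ∧ v ≠ 0 then 1 + pvRun v t else 0

-- the common specification: max over suffixes of 1 + leading run, at least 1
def pvMaxRun : List Int → Int
  | [] => 1
  | x :: t => max (1 + pvRun x t) (pvMaxRun t)

theorem pvRun_nonneg (v : Int) (l : List Int) : 0 ≤ pvRun v l := by
  induction l with
  | nil => simp [pvRun]
  | cons y t ih => simp only [pvRun]; split <;> omega

theorem pvMaxRun_ge_one (l : List Int) : 1 ≤ pvMaxRun l := by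
  induction l with
  | nil => simp [pvMaxRun]
  | cons x t ih => simp only [pvMaxRun]; omega

theorem pvInnerA_eq (l : List Int) (i : Int) (v : Int) (hi : 0 ≤ i)
    (hv : PySem.List.pyGet? l i = some v) :
    ∀ (n : Nat) (k t : Int), 0 ≤ k → ((l.length : Int) - (i + k)).toNat = n →
      pvInnerA l i k t = t + pvRun v (l.drop (i + k).toNat) := by
  intro n
  induction n with
  | zero =>
    intro k t hk hn
    rw [pvInnerA]
    have hge : (l.length : Int) ≤ i + k := by omega
    rw [dif_neg (by omega)]
    have : l.drop (i + k).toNat = [] := by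
      apply List.drop_eq_nil_of_le; omega
    simp [this, pvRun]
  | succ n ih =>
    intro k t hk hn
    have hlt : i + k < (l.length : Int) := by omega
    have h0 : 0 ≤ i + k := by omega
    have hgk : PySem.List.pyGet? l (i + k) = some (l[(i + k).toNat]'(by omega)) :=
      PySem.List.pyGet?_eq_some_getElem l h0 hlt
    have hdrop : l.drop (i + k).toNat =
        l[(i + k).toNat]'(by omega) :: l.drop ((i + k).toNat + 1) :=
      List.drop_eq_getElem_cons (by omega)
    rw [pvInnerA]
    by_cases hc : l[(i + k).toNat]'(by omega) = v ∧ v ≠ 0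
    · rw [dif_pos ⟨hlt, by rw [hv, hgk, hc.1], by rw [hv]; simpa using hc.2⟩]
      rw [ih (k + 1) (t + 1) (by omega) (by omega)]
      have : (i + (k + 1)).toNat = (i + k).toNat + 1 := by omega
      rw [this, hdrop]
      simp only [pvRun, if_pos hc]
      omega
    · rw [dif_neg]
      · rw [hdrop]; simp only [pvRun, if_neg hc]; omega
      · rintro ⟨-, h2, h3⟩
        rw [hv, hgk] at h2
        rw [hv] at h3
        exact hc ⟨(Option.some_inj.mp h2).symm, by simpa using h3⟩

-- A's outer loop over the tail range equals the suffix maximum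
theorem pvA_loop (l : List Int) :
    ∀ (n : Nat) (j : Nat) (f : Int), j ≤ l.length → l.length - j = n → 1 ≤ f →
      (((PySem.List.pyRange (j : Int) l.length 1).foldl
          (fun (st : Int × Int) i =>
            let t := pvInnerA l i 1 st.1
            (1, if t > st.2 then t else st.2))
          (1, f))).2 = max f (pvMaxRun (l.drop j)) := by
  intro n
  induction n with
  | zero =>
    intro j f hj hn hf
    have : l.drop j = [] := List.drop_eq_nil_of_le (by omega)
    rw [PySem.List.pyRange_one_eq_nil (by exact_mod_cast Nat.le_of_sub_eq_zero hn)]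
    simp [this, pvMaxRun]
    omega
  | succ n ih =>
    intro j f hj hn hf
    have hjlt : j < l.length := by omega
    rw [PySem.List.pyRange_one_cons (by exact_mod_cast hjlt)]
    have hg : PySem.List.pyGet? l (j : Int) = some (l[j]'hjlt) :=
      PySem.List.pyGet?_eq_some_getElem l (by omega) (by exact_mod_cast hjlt)
    simp only [List.foldl_cons]
    have ht : pvInnerA l (j : Int) 1 1 = 1 + pvRun (l[j]'hjlt) (l.drop (j + 1)) := by
      have := pvInnerA_eq l (j : Int) (l[j]'hjlt) (by omega) hg
        ((l.length : Int) - ((j : Int) + 1)).toNat 1 1 (by omega) rfl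
      rw [this]
      congr 2
    have hj1 : ((j : Int) + 1) = ((j + 1 : Nat) : Int) := by push_cast; ring
    rw [hj1, ih (j + 1) _ (by omega) (by omega)
        (by have := pvRun_nonneg (l[j]'hjlt) (l.drop (j + 1)); simp only [ht]; split <;> omega)]
    have hdrop : l.drop j = l[j]'hjlt :: l.drop (j + 1) := List.drop_eq_getElem_cons hjlt
    rw [hdrop]
    simp only [pvMaxRun, ht]
    have hr := pvRun_nonneg (l[j]'hjlt) (l.drop (j + 1))
    have hm := pvMaxRun_ge_one (l.drop (j + 1))
    split <;> omega

theorem pvA_eq_maxRun (l : List Int) : check_longest_consecutive l = pvMaxRun l := by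
  unfold check_longest_consecutive
  have h0 : ((0 : Int)) = ((0 : Nat) : Int) := rfl
  rw [h0, pvA_loop l l.length 0 1 (by omega) (by omega) (by omega)]
  have := pvMaxRun_ge_one l
  simp only [List.drop_zero]
  omega

-- B's fold invariant: best ≥ cur ≥ 1, cur is the length of the run ending at x
theorem pvB_loop (t : List Int) :
    ∀ (x best cur : Int), 1 ≤ cur → cur ≤ best →
      (((x :: t).zip t).foldl
          (fun (st : Int × Int) p =>
            let cur := if p.1 = p.2 ∧ p.1 ≠ 0 then st.2 + 1 else 1
            (if cur > st.1 then cur else st.1, cur))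
          (best, cur)).1 = max best (max (cur + pvRun x t) (pvMaxRun t)) := by
  induction t with
  | nil =>
    intro x best cur h1 h2
    simp [pvRun, pvMaxRun]
    omega
  | cons y t' ih =>
    intro x best cur h1 h2
    simp only [List.zip_cons_cons, List.foldl_cons]
    have hr' := pvRun_nonneg y t'
    have hm' := pvMaxRun_ge_one t'
    by_cases hc : x = y ∧ x ≠ 0
    · rw [if_pos hc]
      have hstep : (if cur + 1 > best then cur + 1 else best) ≥ cur + 1 := by split <;> omega
      rw [ih y _ (cur + 1) (by omega) (by omega)]
      have hrun : pvRun x (y :: t') = 1 + pvRun y t' := by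
        obtain ⟨hxy, hx0⟩ := hc
        subst hxy
        simp [pvRun, hx0]
      rw [hrun]
      simp only [pvMaxRun]
      split <;> omega
    · rw [if_neg hc]
      rw [ih y _ 1 (by omega) (by split <;> omega)]
      have hrun : pvRun x (y :: t') = 0 := by
        simp only [pvRun]
        rw [if_neg (by rintro ⟨h1', h2'⟩; exact hc ⟨h1'.symm, h2'⟩)]
      rw [hrun]
      simp only [pvMaxRun]
      split <;> omega

theorem pvB_eq_maxRun (l : List Int) : check_longest_consecutive_alt l = pvMaxRun l := by
  unfold check_longest_consecutive_alt
  cases l with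
  | nil => simp [pvMaxRun, PySem.List.slice]
  | cons x t =>
    rw [PySem.List.slice_from_one]
    simp only [List.tail_cons]
    rw [pvB_loop t x 1 1 (by omega) (by omega)]
    have hr := pvRun_nonneg x t
    have hm := pvMaxRun_ge_one t
    simp only [pvMaxRun]
    omega

-- ===== VERDICT (by name: the statement is the Claim_ definition above) =====
theorem check_longest_consecutive_spec : Claim_equal_check_longest_consecutive := by
  intro l _
  unfold Spec_check_longest_consecutive
  rw [pvA_eq_maxRun, pvB_eq_maxRun]
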